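-- pv_equiv track=rewrite | github.com/artjom3729/Programmeerimise-advendikalender | 14. detsember.py | count_chairs
-- ===== SOURCE A (Python) =====
-- def can_place_chair(grid, row, col):
--     if grid[row][col] != '_':
--         return False
--
--     # Check adjacent tiles
--     adjacent_positions = [
--         (row - 1, col),
--         (row + 1, col),
--         (row, col - 1),
--         (row, col + 1)
--     ]
--
--     has_L = False
--     for r, c in adjacent_positions:
--         if r < 0 or r >= len(grid) or c < 0 or c >= len(grid[0]):
--             continue
--         if grid[r][c] == 'U' or grid[r][c] == 'O':
--             return False
--         if grid[r][c] == 'L':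
--             has_L = True
--
--     return has_L
--
-- def count_chairs(sisend):
--     grid = [list(line) for line in sisend.strip().split('\n')]
--     chair_count = 0
--
--     for row in range(len(grid)):
--         for col in range(len(grid[row])):
--             if can_place_chair(grid, row, col):
--                 chair_count += 1
--
--     return chair_count
-- ===== SOURCE B (Python) =====
-- def _marks(grid, kinds):
--     # coordinates adjacent to any cell of one of the given kinds
--     s = set()
--     for r, line in enumerate(grid):
--         for c, ch in enumerate(line):
--             if ch in kinds:
--                 s.add((r - 1, c))
--                 s.add((r + 1, c))
--                 s.add((r, c - 1))
--                 s.add((r, c + 1))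
--     return s
--
-- def count_chairs(sisend):
--     grid = sisend.strip().split('\n')
--     has_L = _marks(grid, 'L')
--     forbidden = _marks(grid, 'UO')
--     count = 0
--     for r, line in enumerate(grid):
--         for c, ch in enumerate(line):
--             if ch == '_' and (r, c) in has_L and (r, c) not in forbidden:
--                 count += 1
--     return count
-- ===== Notes on version B (the rewrite author's own statement) =====
-- stated objective: alternative
-- what changed: Replaces per-cell outward inspection of the 4 neighbors (with an early-return helper) by source-driven marking: one pass scatters each chair/person cell's neighbor coordinates into two sets (has_L, forbidden), then a final pass counts empty-floor cells that are in has_L and not in forbidden.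
-- outside the precondition, e.g. on count_chairs('L\n_U'): A returns 1, B returns 0; on count_chairs('__\nL'): A raises IndexError, B returns 1
import Mathlib
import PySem

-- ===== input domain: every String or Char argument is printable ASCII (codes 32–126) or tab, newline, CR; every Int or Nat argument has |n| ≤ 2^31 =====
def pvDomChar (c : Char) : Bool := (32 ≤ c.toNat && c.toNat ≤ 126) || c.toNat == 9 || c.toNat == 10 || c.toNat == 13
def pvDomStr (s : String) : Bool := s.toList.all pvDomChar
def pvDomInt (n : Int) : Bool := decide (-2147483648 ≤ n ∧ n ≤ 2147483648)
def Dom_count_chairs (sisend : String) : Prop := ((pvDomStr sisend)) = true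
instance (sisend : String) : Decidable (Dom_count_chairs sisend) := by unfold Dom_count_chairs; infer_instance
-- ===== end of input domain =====

-- B replaces per-cell outward neighbor inspection by source-driven marking (two neighbor sets + a count pass);
-- equivalence is claimed on rectangular grids (Pre_), where the column bound A takes from row 0 is every row's length.


-- ===== PORT A =====
-- grid[r][c]; pyGetD is exact here because in A every access is either at loop indices (in range) or guarded by
-- the bounds checks, which on the rectangular grids admitted by Pre_ guarantee the index is in range
-- (on ragged rows Python can raise IndexError — those inputs are excluded by Pre_).
def pvCell (grid : List (List Char)) (r c : Int) : Char :=
  PySem.List.pyGetD (PySem.List.pyGetD grid r []) c '#'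

-- the bounds test 'r < 0 or r >= len(grid) or c < 0 or c >= len(grid[0])' of can_place_chair
def pvOut (grid : List (List Char)) (q : Int × Int) : Bool :=
  decide (q.1 < 0 ∨ (grid.length : Int) ≤ q.1 ∨ q.2 < 0 ∨
    ((PySem.List.pyGetD grid (0 : Int) []).length : Int) ≤ q.2)

-- the 'for r, c in adjacent_positions' loop of can_place_chair, with its early 'return False'
def pvAdjLoop (grid : List (List Char)) (ps : List (Int × Int)) (hasL : Bool) : Bool :=
  match ps with
  | [] => hasL
  | (r, c) :: rest =>
    if pvOut grid (r, c) then pvAdjLoop grid rest hasL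
    else if pvCell grid r c == 'U' || pvCell grid r c == 'O' then false
    else if pvCell grid r c == 'L' then pvAdjLoop grid rest true
    else pvAdjLoop grid rest hasL

def can_place_chair (grid : List (List Char)) (row col : Int) : Bool :=
  if pvCell grid row col != '_' then false
  else pvAdjLoop grid [(row - 1, col), (row + 1, col), (row, col - 1), (row, col + 1)] false

def pvCountA (grid : List (List Char)) : Int :=
  (PySem.List.pyRange 0 (grid.length : Int) 1).foldl
    (fun acc row =>
      (PySem.List.pyRange 0 ((PySem.List.pyGetD grid row []).length : Int) 1).foldl
        (fun acc2 col => if can_place_chair grid row col then acc2 + 1 else acc2) acc)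
    0

-- grid = [list(line) for line in sisend.strip().split('\n')] (list(line) is the identity on List Char)
def count_chairs (sisend : String) : Int :=
  pvCountA (PySem.Chars.splitOn (PySem.Chars.strip sisend.toList) ['\n'])

-- ===== PORT B =====
-- body of the inner loop of _marks: 'if ch in kinds: add the 4 neighbor coordinates'
def pvMarkCell (kinds : List Char) (r : Int) (s : PySem.Set (Int × Int)) (cc : Int × Char) :
    PySem.Set (Int × Int) :=
  if kinds.contains cc.2 then
    PySem.Set.add (PySem.Set.add (PySem.Set.add (PySem.Set.add s (r - 1, cc.1)) (r + 1, cc.1)) (r, cc.1 - 1)) (r, cc.1 + 1)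
  else s

-- _marks(grid, kinds)
def pvMarks (grid : List (List Char)) (kinds : List Char) : PySem.Set (Int × Int) :=
  (PySem.List.enumerate grid 0).foldl
    (fun s rl => (PySem.List.enumerate rl.2 0).foldl (pvMarkCell kinds rl.1) s)
    PySem.Set.empty

def pvCountB (grid : List (List Char)) : Int :=
  let hasL := pvMarks grid ['L']
  let forbidden := pvMarks grid ['U', 'O']
  (PySem.List.enumerate grid 0).foldl
    (fun acc rl =>
      (PySem.List.enumerate rl.2 0).foldl
        (fun acc2 cc =>
          if cc.2 == '_' && PySem.Set.contains hasL (rl.1, cc.1) && !PySem.Set.contains forbidden (rl.1, cc.1) then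
            acc2 + 1
          else acc2)
        acc)
    0

def count_chairs_alt (sisend : String) : Int :=
  pvCountB (PySem.Chars.splitOn (PySem.Chars.strip sisend.toList) ['\n'])

-- ===== PRECONDITION & SPEC =====
-- Pre_ restricts to rectangular grids (every line of the stripped input, split at newlines, has line 0's
-- length): A takes its column bound from line 0, so on ragged grids it can raise IndexError or bound-check
-- neighbor cells against the wrong row length (see the excluded examples in claim.json).
def Pre_count_chairs (sisend : String) : Prop :=
  ∀ row ∈ PySem.Chars.splitOn (PySem.Chars.strip sisend.toList) ['\n'],
    row.length =
      (PySem.List.pyGetD (PySem.Chars.splitOn (PySem.Chars.strip sisend.toList) ['\n']) (0 : Int) []).length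
instance (sisend : String) : Decidable (Pre_count_chairs sisend) := by
  unfold Pre_count_chairs; infer_instance

def pvWitness_count_chairs : String := "L_\n__"

def Spec_count_chairs (sisend : String) (out : Int) : Prop := out = count_chairs_alt sisend
instance (sisend : String) (out : Int) : Decidable (Spec_count_chairs sisend out) := by
  unfold Spec_count_chairs; infer_instance

-- ===== CLAIM (what is proved, stated in full; the proofs are below) =====
def Claim_equal_count_chairs : Prop :=
  ∀ (sisend : String), Dom_count_chairs sisend → Pre_count_chairs sisend →
    Spec_count_chairs sisend (count_chairs sisend)

-- ===== LEMMAS AND PROOFS =====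

-- the four neighbor coordinates of a cell
def pvNbrs (r c : Int) : List (Int × Int) := [(r - 1, c), (r + 1, c), (r, c - 1), (r, c + 1)]

-- q is in bounds and holds one of the given kinds of cell
def pvHit (grid : List (List Char)) (kinds : List Char) (q : Int × Int) : Bool :=
  !pvOut grid q && decide (pvCell grid q.1 q.2 ∈ kinds)

theorem mem_nbrs_comm (a b r c : Int) : ((a, b) ∈ pvNbrs r c) ↔ ((r, c) ∈ pvNbrs a b) := by
  simp only [pvNbrs, List.mem_cons, List.not_mem_nil, or_false, Prod.mk.injEq]
  omega

theorem mem_markCell (kinds : List Char) (r : Int) (s : PySem.Set (Int × Int)) (cc : Int × Char)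
    (p : Int × Int) :
    p ∈ pvMarkCell kinds r s cc ↔ p ∈ s ∨ (cc.2 ∈ kinds ∧ p ∈ pvNbrs r cc.1) := by
  unfold pvMarkCell
  split
  · next h =>
    have hk : cc.2 ∈ kinds := by simpa using h
    simp only [PySem.Set.mem_add, pvNbrs, List.mem_cons, List.not_mem_nil, or_false, hk, true_and]
    tauto
  · next h =>
    have hk : ¬ cc.2 ∈ kinds := by simpa using h
    simp [hk]

theorem mem_marks_inner (kinds : List Char) (r : Int) (row : List Char) (s0 : Int)
    (s : PySem.Set (Int × Int)) (p : Int × Int) :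
    p ∈ (PySem.List.enumerate row s0).foldl (pvMarkCell kinds r) s ↔
      p ∈ s ∨ ∃ cc ∈ PySem.List.enumerate row s0, cc.2 ∈ kinds ∧ p ∈ pvNbrs r cc.1 := by
  induction row generalizing s0 s with
  | nil => simp [PySem.List.enumerate_nil]
  | cons x xs ih =>
    rw [PySem.List.enumerate_cons, List.foldl_cons, ih]
    simp only [mem_markCell, List.mem_cons]
    constructor
    · rintro ((h | ⟨hx, hn⟩) | ⟨cc, hcc, hk, hn⟩)
      · exact Or.inl h
      · exact Or.inr ⟨(s0, x), Or.inl rfl, hx, hn⟩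
      · exact Or.inr ⟨cc, Or.inr hcc, hk, hn⟩
    · rintro (h | ⟨cc, (rfl | hcc), hk, hn⟩)
      · exact Or.inl (Or.inl h)
      · exact Or.inl (Or.inr ⟨hk, hn⟩)
      · exact Or.inr ⟨cc, hcc, hk, hn⟩

theorem mem_marks_outer (kinds : List Char) (gs : List (List Char)) (s0 : Int)
    (s : PySem.Set (Int × Int)) (p : Int × Int) :
    p ∈ (PySem.List.enumerate gs s0).foldl
        (fun s rl => (PySem.List.enumerate rl.2 0).foldl (pvMarkCell kinds rl.1) s) s ↔
      p ∈ s ∨ ∃ rl ∈ PySem.List.enumerate gs s0, ∃ cc ∈ PySem.List.enumerate rl.2 0,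
        cc.2 ∈ kinds ∧ p ∈ pvNbrs rl.1 cc.1 := by
  induction gs generalizing s0 s with
  | nil => simp [PySem.List.enumerate_nil]
  | cons g gs ih =>
    rw [PySem.List.enumerate_cons, List.foldl_cons, ih]
    rw [mem_marks_inner]
    simp only [List.mem_cons]
    constructor
    · rintro ((h | ⟨cc, hcc, hk, hn⟩) | ⟨rl, hrl, hrest⟩)
      · exact Or.inl h
      · exact Or.inr ⟨(s0, g), Or.inl rfl, cc, hcc, hk, hn⟩
      · exact Or.inr ⟨rl, Or.inr hrl, hrest⟩
    · rintro (h | ⟨rl, (rfl | hrl), hrest⟩)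
      · exact Or.inl (Or.inl h)
      · exact Or.inl (Or.inr hrest)
      · exact Or.inr ⟨rl, hrl, hrest⟩

theorem mem_marks (grid : List (List Char)) (kinds : List Char) (p : Int × Int) :
    p ∈ pvMarks grid kinds ↔
      ∃ rl ∈ PySem.List.enumerate grid 0, ∃ cc ∈ PySem.List.enumerate rl.2 0,
        cc.2 ∈ kinds ∧ p ∈ pvNbrs rl.1 cc.1 := by
  rw [pvMarks, mem_marks_outer]
  simp [PySem.Set.empty]

theorem contains_marks (grid : List (List Char))
    (hrect : ∀ row ∈ grid, row.length = (PySem.List.pyGetD grid (0 : Int) []).length)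
    (kinds : List Char) (r c : Int) :
    ((r, c) ∈ pvMarks grid kinds) ↔
      ∃ q ∈ pvNbrs r c, pvOut grid q = false ∧ pvCell grid q.1 q.2 ∈ kinds := by
  rw [mem_marks]
  constructor
  · rintro ⟨rl, hrl, cc, hcc, hk, hn⟩
    rw [PySem.List.mem_enumerate_iff] at hrl
    obtain ⟨a, ha, rfl⟩ := hrl
    rw [PySem.List.mem_enumerate_iff] at hcc
    obtain ⟨b, hb, rfl⟩ := hcc
    have hW : grid[a].length = (PySem.List.pyGetD grid (0 : Int) []).length :=
      hrect _ (List.getElem_mem ha)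
    have hcell : pvCell grid ((0 : Int) + a) ((0 : Int) + b) = grid[a][b] := by
      simp only [zero_add]
      rw [pvCell, PySem.List.pyGetD_natCast, PySem.List.pyGetD_natCast]
      rw [List.getD_eq_getElem?_getD, List.getD_eq_getElem?_getD]
      rw [List.getElem?_eq_getElem ha]
      simp [List.getElem?_eq_getElem hb]
    refine ⟨((0 : Int) + a, (0 : Int) + b), (mem_nbrs_comm _ _ _ _).mp hn, ?_, ?_⟩
    · rw [pvOut, decide_eq_false_iff_not]
      push_neg
      refine ⟨by omega, by push_cast; omega, by omega, ?_⟩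
      have : (b : Int) < grid[a].length := by exact_mod_cast hb
      push_cast
      omega
    · rw [hcell]; exact hk
  · rintro ⟨⟨a0, b0⟩, hq, hout, hcell⟩
    rw [pvOut, decide_eq_false_iff_not] at hout
    push_neg at hout
    obtain ⟨h1, h2, h3, h4⟩ := hout
    simp only at h1 h2 h3 h4
    have ha : a0.toNat < grid.length := by omega
    have ha0 : a0 = (a0.toNat : Int) := by omega
    have hW : grid[a0.toNat].length = (PySem.List.pyGetD grid (0 : Int) []).length :=
      hrect _ (List.getElem_mem ha)
    have hb : b0.toNat < grid[a0.toNat].length := by omega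
    have hb0 : b0 = (b0.toNat : Int) := by omega
    have hcell' : pvCell grid a0 b0 = grid[a0.toNat][b0.toNat] := by
      rw [pvCell]
      conv_lhs => rw [ha0, hb0]
      rw [PySem.List.pyGetD_natCast, PySem.List.pyGetD_natCast]
      rw [List.getD_eq_getElem?_getD, List.getD_eq_getElem?_getD]
      rw [List.getElem?_eq_getElem ha]
      simp [List.getElem?_eq_getElem hb]
    refine ⟨((0 : Int) + a0.toNat, grid[a0.toNat]), ?_, ((0 : Int) + b0.toNat, grid[a0.toNat][b0.toNat]), ?_, ?_, ?_⟩
    · rw [PySem.List.mem_enumerate_iff]; exact ⟨a0.toNat, ha, rfl⟩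
    · rw [PySem.List.mem_enumerate_iff]; exact ⟨b0.toNat, hb, rfl⟩
    · show grid[a0.toNat][b0.toNat] ∈ kinds
      rw [← hcell']; exact hcell
    · show (r, c) ∈ pvNbrs ((0 : Int) + (a0.toNat : Int)) ((0 : Int) + (b0.toNat : Int))
      have hA : (0 : Int) + (a0.toNat : Int) = a0 := by omega
      have hB : (0 : Int) + (b0.toNat : Int) = b0 := by omega
      rw [hA, hB]
      exact (mem_nbrs_comm _ _ _ _).mp hq

theorem contains_marks_bool (grid : List (List Char))
    (hrect : ∀ row ∈ grid, row.length = (PySem.List.pyGetD grid (0 : Int) []).length)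
    (kinds : List Char) (r c : Int) :
    PySem.Set.contains (pvMarks grid kinds) (r, c) = (pvNbrs r c).any (pvHit grid kinds) := by
  rw [Bool.eq_iff_iff]
  rw [show (PySem.Set.contains (pvMarks grid kinds) (r, c) = true) ↔ ((r, c) ∈ pvMarks grid kinds) by
    simp [PySem.Set.contains]]
  rw [contains_marks grid hrect kinds r c, List.any_eq_true]
  constructor
  · rintro ⟨q, hq, h1, h2⟩
    exact ⟨q, hq, by simp [pvHit, h1, h2]⟩
  · rintro ⟨q, hq, h⟩
    simp only [pvHit, Bool.and_eq_true, Bool.not_eq_true', decide_eq_true_eq] at h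
    exact ⟨q, hq, h.1, h.2⟩

theorem adjLoop_eq (grid : List (List Char)) (ps : List (Int × Int)) (hasL : Bool) :
    pvAdjLoop grid ps hasL =
      (!ps.any (pvHit grid ['U', 'O']) && (hasL || ps.any (pvHit grid ['L']))) := by
  induction ps generalizing hasL with
  | nil => simp [pvAdjLoop]
  | cons q rest ih =>
    obtain ⟨r, c⟩ := q
    rw [pvAdjLoop]
    split_ifs with h1 h2 h3
    · have hb : pvHit grid ['U', 'O'] (r, c) = false := by simp [pvHit, h1]
      have hg : pvHit grid ['L'] (r, c) = false := by simp [pvHit, h1]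
      rw [ih]
      simp [List.any_cons, hb, hg]
    · have hb : pvHit grid ['U', 'O'] (r, c) = true := by
        simp only [Bool.or_eq_true, beq_iff_eq] at h2
        simp [pvHit, h1]
        tauto
      simp [List.any_cons, hb]
    · have hcl : pvCell grid r c = 'L' := by simpa using h3
      have hb : pvHit grid ['U', 'O'] (r, c) = false := by simp [pvHit, hcl]
      have hg : pvHit grid ['L'] (r, c) = true := by simp [pvHit, h1, hcl]
      rw [ih]
      simp [List.any_cons, hb, hg]
    · have hb : pvHit grid ['U', 'O'] (r, c) = false := by
        simp only [Bool.or_eq_true, beq_iff_eq, not_or] at h2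
        simp [pvHit]
        tauto
      have hg : pvHit grid ['L'] (r, c) = false := by
        have : ¬ pvCell grid r c = 'L' := by simpa using h3
        simp [pvHit, this]
      rw [ih]
      simp [List.any_cons, hb, hg]

theorem can_place_eq (grid : List (List Char)) (r c : Int) :
    can_place_chair grid r c =
      (pvCell grid r c == '_' && (pvNbrs r c).any (pvHit grid ['L']) &&
        !(pvNbrs r c).any (pvHit grid ['U', 'O'])) := by
  unfold can_place_chair
  split_ifs with h
  · have : (pvCell grid r c == '_') = false := by
      simpa using h
    simp [this]
  · have h' : (pvCell grid r c == '_') = true := by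
      simpa using h
    rw [show [(r - 1, c), (r + 1, c), (r, c - 1), (r, c + 1)] = pvNbrs r c from rfl, adjLoop_eq]
    cases hb : (pvNbrs r c).any (pvHit grid ['U', 'O']) <;>
      cases hg : (pvNbrs r c).any (pvHit grid ['L']) <;> simp [h']

theorem countAB (grid : List (List Char))
    (hrect : ∀ row ∈ grid, row.length = (PySem.List.pyGetD grid (0 : Int) []).length) :
    pvCountA grid = pvCountB grid := by
  unfold pvCountA
  simp only [pvCountB]
  rw [PySem.List.enumerate_eq_map_pyRange grid [], List.foldl_map]
  simp only [PySem.List.len_eq]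
  apply PySem.List.foldl_congr_mem
  intro acc row hrow
  rw [PySem.List.enumerate_eq_map_pyRange (PySem.List.pyGetD grid row []) '#', List.foldl_map]
  simp only [PySem.List.len_eq]
  apply PySem.List.foldl_congr_mem
  intro acc2 col hcol
  simp only [can_place_eq, contains_marks_bool grid hrect, pvCell]

-- ===== VERDICT (by name: the statement is the Claim_ definition above) =====
theorem count_chairs_spec : Claim_equal_count_chairs := by
  intro sisend _ hpre
  unfold Spec_count_chairs count_chairs count_chairs_alt
  exact countAB _ hpre
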